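-- pv_equiv track=rewrite | github.com/dylanljones/exactdiag | exactdiag/project.py | _hopping_candidates
-- ===== SOURCE A (Python) =====
-- def _hopping_candidates(num_sites, state, pos):
--     results = []
--     op = 1 << pos
--     occ = state & op
--     sign_to = 1
--     sign_from = 1
--     tmp = state ^ op  # Annihilate or create electron at `pos`
--     for pos2 in range(num_sites):
--         if pos >= pos2:
--             continue
--         op2 = 1 << pos2
--         occ2 = state & op2
--
--         # Hopping from `pos` to `pos2` possible
--         if occ and not occ2:
--             new = tmp ^ op2
--             results.append((pos2, new, sign_to))
--         else:  # state filled, no hopping but sign change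
--             sign_to *= -1
--
--         # Hopping from `pos2` to `pos` possible
--         if not occ and occ2:
--             new = tmp ^ op2
--             results.append((pos2, new, sign_from))
--             sign_from *= -1  # if this site is jumped over sign changes
--     return results
-- ===== SOURCE B (Python) =====
-- def _hopping_candidates(num_sites, state, pos):
--     op = 1 << pos
--     tmp = state ^ op
--     occupied = bool(state & op)
--
--     def sign(pos2):
--         # (-1) ** (number of occupied sites strictly between pos and pos2)
--         between = state & (((1 << pos2) - 1) ^ (2 * op - 1))
--         return -1 if bin(between).count("1") % 2 else 1
--
--     return [
--         (pos2, tmp ^ (1 << pos2), sign(pos2))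
--         for pos2 in range(pos + 1, num_sites)
--         if bool(state & (1 << pos2)) != occupied
--     ]
-- ===== Notes on version B (the rewrite author's own statement) =====
-- stated objective: alternative
-- what changed: Replaces A's stateful scan over range(num_sites) with two running sign accumulators by a filter-plus-map comprehension over range(pos+1, num_sites) whose sign is a closed-form per-candidate formula: (-1) to the popcount of the occupied bits strictly between pos and pos2, extracted with a bit mask.
import Mathlib
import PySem

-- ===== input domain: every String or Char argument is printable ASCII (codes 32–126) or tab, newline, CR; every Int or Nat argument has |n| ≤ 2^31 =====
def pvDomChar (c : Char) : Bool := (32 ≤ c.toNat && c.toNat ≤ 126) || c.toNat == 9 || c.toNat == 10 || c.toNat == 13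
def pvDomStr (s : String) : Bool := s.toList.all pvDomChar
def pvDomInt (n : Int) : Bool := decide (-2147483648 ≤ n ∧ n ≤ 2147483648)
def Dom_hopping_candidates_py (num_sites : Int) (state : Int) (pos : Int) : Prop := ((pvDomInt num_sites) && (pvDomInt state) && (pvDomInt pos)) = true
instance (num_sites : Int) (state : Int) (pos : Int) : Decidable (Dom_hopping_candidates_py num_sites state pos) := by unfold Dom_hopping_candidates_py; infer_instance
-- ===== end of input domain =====

-- B replaces A's stateful scan with its two running sign accumulators by a filter-plus-map
-- comprehension over the sites above pos whose sign is a closed-form per-candidate parity formula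
-- (objective: alternative).

-- Python's `1 << p` for p ≥ 0 (used by both ports; under Pre_ 0 ≤ p, so i.toNat is exact)
def pvPow (i : Int) : Int := (1 : Int) <<< i.toNat

-- ===== PORT A =====
-- one iteration of A's for-loop over the state (results, sign_to, sign_from)
def pvAStep (pos tmp occ state : Int) (acc : List (Int × Int × Int) × Int × Int)
    (pos2 : Int) : List (Int × Int × Int) × Int × Int :=
  if pos ≥ pos2 then acc
  else
    let op2 : Int := pvPow pos2
    let occ2 := PySem.Int.band state op2
    let acc1 :=
      if occ ≠ 0 ∧ occ2 = 0 then
        (acc.1 ++ [(pos2, PySem.Int.bxor tmp op2, acc.2.1)], acc.2.1, acc.2.2)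
      else (acc.1, acc.2.1 * (-1), acc.2.2)
    if occ = 0 ∧ occ2 ≠ 0 then
      (acc1.1 ++ [(pos2, PySem.Int.bxor tmp op2, acc1.2.2)], acc1.2.1, acc1.2.2 * (-1))
    else acc1

def hopping_candidates_py (num_sites : Int) (state : Int) (pos : Int) : List (Int × Int × Int) :=
  let op : Int := pvPow pos
  let occ := PySem.Int.band state op
  let tmp := PySem.Int.bxor state op
  ((PySem.List.pyRange 0 num_sites 1).foldl (pvAStep pos tmp occ state) ([], 1, 1)).1

-- ===== PORT B =====
-- B's helper sign(pos2): bin(between).count("1") is PySem.Int.bitCount (exact here: between ≥ 0)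
def pvBSign (state pos pos2 : Int) : Int :=
  let between := PySem.Int.band state (PySem.Int.bxor (pvPow pos2 - 1) (2 * pvPow pos - 1))
  if PySem.Int.bitCount between % 2 = 1 then -1 else 1

def hopping_candidates_py_alt (num_sites : Int) (state : Int) (pos : Int) : List (Int × Int × Int) :=
  let op : Int := pvPow pos
  let tmp := PySem.Int.bxor state op
  let occupied := decide (PySem.Int.band state op ≠ 0)
  ((PySem.List.pyRange (pos + 1) num_sites 1).filter
      (fun pos2 => decide (PySem.Int.band state (pvPow pos2) ≠ 0) != occupied)).map
    (fun pos2 => (pos2, PySem.Int.bxor tmp (pvPow pos2), pvBSign state pos pos2))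

-- ===== PRECONDITION & SPEC =====
-- Python raises ValueError ("negative shift count") at `1 << pos` when pos < 0 (in A and in B).
def Pre_hopping_candidates_py (num_sites : Int) (state : Int) (pos : Int) : Prop := 0 ≤ pos
instance (num_sites : Int) (state : Int) (pos : Int) : Decidable (Pre_hopping_candidates_py num_sites state pos) := by unfold Pre_hopping_candidates_py; infer_instance

def pvWitness_hopping_candidates_py : Int × Int × Int := (5, 11, 1)

def Spec_hopping_candidates_py (num_sites : Int) (state : Int) (pos : Int) (out : List (Int × Int × Int)) : Prop := out = hopping_candidates_py_alt num_sites state pos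
instance (num_sites : Int) (state : Int) (pos : Int) (out : List (Int × Int × Int)) : Decidable (Spec_hopping_candidates_py num_sites state pos out) := by unfold Spec_hopping_candidates_py; infer_instance

-- ===== CLAIM (what is proved, stated in full; the proofs are below) =====
def Claim_equal_hopping_candidates_py : Prop := ∀ (num_sites : Int) (state : Int) (pos : Int), Dom_hopping_candidates_py num_sites state pos → Pre_hopping_candidates_py num_sites state pos → Spec_hopping_candidates_py num_sites state pos (hopping_candidates_py num_sites state pos)

-- ===== LEMMAS AND PROOFS =====

-- x ||| 2^k = x + 2^k for x below the bit
theorem pvLorPow : ∀ (k : Nat), ∀ x, x < 2 ^ k → x ||| 2 ^ k = x + 2 ^ k := by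
  intro k
  induction k with
  | zero => intro x hx; interval_cases x; decide
  | succ k ih =>
    intro x hx
    have h2 : (0 : Nat) < 2 ^ k := Nat.two_pow_pos k
    have hx2 : x / 2 < 2 ^ k := by
      have : (2 : Nat) ^ (k + 1) = 2 * 2 ^ k := by ring
      omega
    have hd : (x ||| 2 ^ (k + 1)) / 2 = (x / 2) ||| 2 ^ k := by
      rw [Nat.or_div_two]
      congr 1
      rw [pow_succ]; omega
    have hm : (x ||| 2 ^ (k + 1)) % 2 = x % 2 := by
      rw [← Nat.and_one_is_mod, ← Nat.and_one_is_mod, Nat.and_or_distrib_right]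
      have : (2 : Nat) ^ (k + 1) &&& 1 = 0 := by
        rw [Nat.and_one_is_mod, pow_succ, Nat.mul_mod_left]
      rw [this, Nat.or_zero]
    have hih := ih (x / 2) hx2
    have hval := Nat.div_add_mod (x ||| 2 ^ (k + 1)) 2
    rw [hd, hm, hih] at hval
    have : (2 : Nat) ^ (k + 1) = 2 * 2 ^ k := by ring
    omega

-- adding a bit above x adds one to the popcount
theorem pvBitCountAddPow : ∀ (k : Nat), ∀ x, x < 2 ^ k →
    PySem.Int.bitCount ((x + 2 ^ k : Nat) : Int) = PySem.Int.bitCount ((x : Nat) : Int) + 1 := by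
  intro k
  induction k with
  | zero => intro x hx; interval_cases x; decide
  | succ k ih =>
    intro x hx
    have hp : (2 : Nat) ^ (k + 1) = 2 * 2 ^ k := by ring
    have h2 : (0 : Nat) < 2 ^ k := Nat.two_pow_pos k
    have hx2 : x / 2 < 2 ^ k := by omega
    rw [PySem.Int.bitCount_natCast (show 0 < x + 2 ^ (k + 1) by omega)]
    have hdiv : (x + 2 ^ (k + 1)) / 2 = x / 2 + 2 ^ k := by omega
    have hmod : (x + 2 ^ (k + 1)) % 2 = x % 2 := by omega
    rw [hdiv, hmod, ih (x / 2) hx2]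
    by_cases hx0 : x = 0
    · subst hx0; simp
    · rw [PySem.Int.bitCount_natCast (show 0 < x by omega)]
      omega

-- the comprehension's mask is the contiguous block of bits pos+1 … pos2-1
theorem pvMaskShape (p d : Nat) :
    (2 ^ (p + 1 + d) - 1) ^^^ (2 ^ (p + 1) - 1) = (2 ^ d - 1) <<< (p + 1) := by
  apply Nat.eq_of_testBit_eq
  intro i
  simp only [Nat.testBit_xor, Nat.testBit_two_pow_sub_one, Nat.testBit_shiftLeft]
  by_cases h1 : i < p + 1 + d <;> by_cases h2 : i < p + 1 <;> by_cases h3 : p + 1 ≤ i <;>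
    simp [h1, h2, h3] <;> omega

-- splitting off the top bit of the mask
theorem pvMaskSplit (p d : Nat) :
    (2 ^ (d + 1) - 1) <<< (p + 1) = ((2 ^ d - 1) <<< (p + 1)) ||| 2 ^ (p + 1 + d) := by
  apply Nat.eq_of_testBit_eq
  intro i
  simp only [Nat.testBit_shiftLeft, Nat.testBit_lor, Nat.testBit_two_pow_sub_one,
    Nat.testBit_two_pow]
  by_cases h3 : p + 1 ≤ i <;> by_cases h4 : i - (p + 1) < d + 1 <;> by_cases h5 : i - (p + 1) < d <;>
    by_cases h6 : p + 1 + d = i <;> simp [h3, h4, h5, h6] <;> omega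

-- core parity recurrence, at Nat indices (state may be negative: Python's two's complement)
theorem pvCore (state : Int) (p d : Nat) :
    PySem.Int.bitCount (PySem.Int.band state (((2 ^ (d + 1) - 1) <<< (p + 1) : Nat) : Int))
      = PySem.Int.bitCount (PySem.Int.band state (((2 ^ d - 1) <<< (p + 1) : Nat) : Int))
        + (if PySem.Int.band state ((2 ^ (p + 1 + d) : Nat) : Int) = 0 then 0 else 1) := by
  set k := p + 1 + d with hk
  have hMdval : (2 ^ d - 1) <<< (p + 1) + 2 ^ (p + 1) = 2 ^ k := by
    rw [Nat.shiftLeft_eq, hk]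
    have h1 : (0 : Nat) < 2 ^ d := Nat.two_pow_pos d
    have : (2 : Nat) ^ (p + 1 + d) = 2 ^ d * 2 ^ (p + 1) := by rw [pow_add]; ring
    rw [this]
    calc (2 ^ d - 1) * 2 ^ (p + 1) + 2 ^ (p + 1) = (2 ^ d - 1 + 1) * 2 ^ (p + 1) := by ring
    _ = 2 ^ d * 2 ^ (p + 1) := by rw [Nat.sub_add_cancel h1]
  have hMdlt : (2 ^ d - 1) <<< (p + 1) < 2 ^ k := by
    have := Nat.two_pow_pos (p + 1); omega
  have hsplit := pvMaskSplit p d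
  by_cases hs : 0 ≤ state
  · obtain ⟨s, rfl⟩ : ∃ s : Nat, state = (s : Int) := ⟨state.toNat, (Int.toNat_of_nonneg hs).symm⟩
    simp only [PySem.Int.band_natCast]
    rw [hsplit, Nat.and_or_distrib_left]
    have hx : s &&& (2 ^ d - 1) <<< (p + 1) < 2 ^ k := lt_of_le_of_lt Nat.and_le_right hMdlt
    have h2p := Nat.and_two_pow s k
    by_cases ht : s.testBit k
    · rw [ht] at h2p
      simp only [Bool.toNat_true, one_mul] at h2p
      rw [h2p, pvLorPow k _ hx, pvBitCountAddPow k _ hx]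
      simp
    · rw [Bool.eq_false_iff.mpr ht] at h2p
      simp only [Bool.toNat_false, zero_mul] at h2p
      rw [h2p, Nat.or_zero]
      simp
  · have hs' : ¬ (0 ≤ state) := hs
    set t := (-state - 1).toNat with hts
    have hband : ∀ m : Nat, PySem.Int.band state (m : Int) = ((m - (m &&& t) : Nat) : Int) := by
      intro m
      simp only [PySem.Int.band]
      rw [if_neg hs', if_pos (by positivity : (0 : Int) ≤ (m : Int))]
      rw [Int.toNat_natCast, hts]
    rw [hband, hband, hband]
    have hand' : (2 : Nat) ^ k &&& t = (t.testBit k).toNat * 2 ^ k := by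
      rw [Nat.and_comm]; exact Nat.and_two_pow t k
    have hMsum : (2 ^ (d + 1) - 1) <<< (p + 1) &&& t
        = ((2 ^ d - 1) <<< (p + 1) &&& t) ||| (2 ^ k &&& t) := by
      rw [hsplit, Nat.and_or_distrib_right]
    have hxle : (2 ^ d - 1) <<< (p + 1) &&& t ≤ (2 ^ d - 1) <<< (p + 1) := Nat.and_le_left
    have hxlt : (2 ^ d - 1) <<< (p + 1) &&& t < 2 ^ k := lt_of_le_of_lt hxle hMdlt
    have hMbig : (2 ^ (d + 1) - 1) <<< (p + 1) = (2 ^ d - 1) <<< (p + 1) + 2 ^ k := by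
      rw [hsplit, pvLorPow k _ hMdlt]
    by_cases ht : t.testBit k
    · rw [ht] at hand'
      simp only [Bool.toNat_true, one_mul] at hand'
      rw [hMsum, hand', pvLorPow k _ hxlt, hMbig]
      rw [Nat.add_sub_add_right]
      simp
    · rw [Bool.eq_false_iff.mpr ht] at hand'
      simp only [Bool.toNat_false, zero_mul] at hand'
      rw [hMsum, hand', Nat.or_zero, hMbig]
      have hv : (2 ^ d - 1) <<< (p + 1) + 2 ^ k - ((2 ^ d - 1) <<< (p + 1) &&& t)
          = ((2 ^ d - 1) <<< (p + 1) - ((2 ^ d - 1) <<< (p + 1) &&& t)) + 2 ^ k := by omega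
      rw [hv, pvBitCountAddPow k _ (by omega)]
      simp

-- pvPow as a cast of a Nat power, and the two subtracted forms
theorem pvPowCast (i : Int) : pvPow i = ((2 ^ i.toNat : Nat) : Int) := by
  unfold pvPow
  simp [Int.shiftLeft_eq]

theorem pvPowSub (i : Int) : pvPow i - 1 = ((2 ^ i.toNat - 1 : Nat) : Int) := by
  rw [pvPowCast]
  have := Nat.two_pow_pos i.toNat
  push_cast [this]
  ring

theorem pvPowSub2 (i : Int) : 2 * pvPow i - 1 = ((2 ^ (i.toNat + 1) - 1 : Nat) : Int) := by
  rw [pvPowCast]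
  have := Nat.two_pow_pos (i.toNat + 1)
  push_cast [this]
  rw [pow_succ]
  ring

-- B's per-candidate sign written through the Nat mask
theorem pvBSign_eq (state pos a : Int) (hpos : 0 ≤ pos) (ha : pos < a) :
    pvBSign state pos a =
      (if PySem.Int.bitCount (PySem.Int.band state
          (((2 ^ ((a.toNat - (pos.toNat + 1)) : Nat) - 1) <<< (pos.toNat + 1) : Nat) : Int)) % 2 = 1
        then -1 else 1) := by
  unfold pvBSign
  rw [pvPowSub, pvPowSub2, PySem.Int.bxor_natCast]
  have h1 : pos.toNat + 1 + (a.toNat - (pos.toNat + 1)) = a.toNat := by omega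
  rw [← pvMaskShape pos.toNat (a.toNat - (pos.toNat + 1)), h1]

-- B's sign at the first site after pos is 1
theorem pvBSign_base (state pos : Int) (hpos : 0 ≤ pos) : pvBSign state pos (pos + 1) = 1 := by
  unfold pvBSign
  have h1 : (pos + 1).toNat = pos.toNat + 1 := by omega
  rw [pvPowSub, pvPowSub2, h1, PySem.Int.bxor_natCast]
  simp

-- the sign recurrence: B's closed-form sign flips exactly at occupied sites
theorem pvBSign_succ (state pos a : Int) (hpos : 0 ≤ pos) (ha : pos < a) :
    pvBSign state pos (a + 1) =
      (if PySem.Int.band state (pvPow a) = 0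
        then pvBSign state pos a else -(pvBSign state pos a)) := by
  rw [pvBSign_eq state pos a hpos ha, pvBSign_eq state pos (a + 1) hpos (by omega)]
  have h2 : (a + 1).toNat - (pos.toNat + 1) = (a.toNat - (pos.toNat + 1)) + 1 := by omega
  rw [h2]
  have hcore := pvCore state pos.toNat (a.toNat - (pos.toNat + 1))
  have h3 : pos.toNat + 1 + (a.toNat - (pos.toNat + 1)) = a.toNat := by omega
  rw [h3] at hcore
  rw [hcore, pvPowCast]
  by_cases hb : PySem.Int.band state ((2 ^ a.toNat : Nat) : Int) = 0
  · simp only [hb, if_true]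
    split_ifs with hp1 hp2 <;> omega
  · simp only [hb, if_false]
    split_ifs with hp1 hp2 <;> omega

-- A's loop skips (is the identity on) every pos2 ≤ pos
theorem pvA_skip (pos tmp occ state : Int) :
    ∀ (l : List Int) (acc : List (Int × Int × Int) × Int × Int),
      (∀ x ∈ l, x ≤ pos) → l.foldl (pvAStep pos tmp occ state) acc = acc := by
  intro l
  induction l with
  | nil => intro acc _; rfl
  | cons x xs ih =>
    intro acc h
    have hx : x ≤ pos := h x (by simp)
    simp only [List.foldl_cons, pvAStep, if_pos (by omega : pos ≥ x)]
    exact ih acc (fun y hy => h y (by simp [hy]))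

-- A's loop over range(num_sites) reduces to a loop over range(pos+1, num_sites)
theorem pvA_range (num_sites state pos tmp occ : Int) (hpos : 0 ≤ pos) :
    ((PySem.List.pyRange 0 num_sites 1).foldl (pvAStep pos tmp occ state) ([], 1, 1))
      = ((PySem.List.pyRange (pos + 1) num_sites 1).foldl (pvAStep pos tmp occ state) ([], 1, 1)) := by
  by_cases hn : num_sites ≤ pos + 1
  · rw [PySem.List.pyRange_one_eq_nil hn]
    by_cases hn0 : num_sites ≤ 0
    · rw [PySem.List.pyRange_one_eq_nil hn0]
    · exact pvA_skip pos tmp occ state _ _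
        (fun x hx => by
          have := (PySem.List.mem_pyRange_one.mp hx)
          omega)
  · rw [PySem.List.pyRange_one_append 0 (pos + 1) num_sites (by omega) (by omega),
      List.foldl_append,
      pvA_skip pos tmp occ state (PySem.List.pyRange 0 (pos + 1) 1) ([], 1, 1)
        (fun x hx => by
          have := (PySem.List.mem_pyRange_one.mp hx)
          omega)]

-- occupied regime: A's fold produces B's filter/map; invariant: sign_to = pvBSign at the loop head
theorem pvA_occ (state pos : Int) (hpos : 0 ≤ pos)
    (hocc : PySem.Int.band state (pvPow pos) ≠ 0) :
    ∀ (k : Nat) (n a : Int), (n - a).toNat = k → pos < a →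
      ∀ (res : List (Int × Int × Int)) (sf : Int),
        ((PySem.List.pyRange a n 1).foldl
            (pvAStep pos (PySem.Int.bxor state (pvPow pos))
              (PySem.Int.band state (pvPow pos)) state)
            (res, pvBSign state pos a, sf)).1
          = res ++ ((PySem.List.pyRange a n 1).filter
              (fun pos2 => decide (PySem.Int.band state (pvPow pos2) ≠ 0) != true)).map
              (fun pos2 => (pos2, PySem.Int.bxor (PySem.Int.bxor state (pvPow pos)) (pvPow pos2),
                pvBSign state pos pos2)) := by
  intro k
  induction k with
  | zero =>
    intro n a hk ha res sf
    rw [PySem.List.pyRange_one_eq_nil (by omega)]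
    simp
  | succ k ih =>
    intro n a hk ha res sf
    have han : a < n := by omega
    rw [PySem.List.pyRange_one_cons han]
    simp only [List.foldl_cons, List.filter_cons]
    by_cases hocc2 : PySem.Int.band state (pvPow a) = 0
    · have hstep : pvAStep pos (PySem.Int.bxor state (pvPow pos))
          (PySem.Int.band state (pvPow pos)) state
          (res, pvBSign state pos a, sf) a
          = (res ++ [(a, PySem.Int.bxor (PySem.Int.bxor state (pvPow pos)) (pvPow a), pvBSign state pos a)],
              pvBSign state pos (a + 1), sf) := by
        rw [pvBSign_succ state pos a hpos ha, if_pos hocc2]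
        simp [pvAStep, hocc, hocc2, show ¬ pos ≥ a by omega]
      rw [hstep, ih n (a + 1) (by omega) (by omega)]
      have hcond : (decide (PySem.Int.band state (pvPow a) ≠ 0) != true) = true := by
        simp [hocc2]
      rw [hcond, if_pos rfl]
      simp
    · have hstep : pvAStep pos (PySem.Int.bxor state (pvPow pos))
          (PySem.Int.band state (pvPow pos)) state
          (res, pvBSign state pos a, sf) a
          = (res, pvBSign state pos (a + 1), sf) := by
        rw [pvBSign_succ state pos a hpos ha, if_neg hocc2]
        simp [pvAStep, hocc, hocc2, show ¬ pos ≥ a by omega]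
      rw [hstep, ih n (a + 1) (by omega) (by omega)]
      have hcond : (decide (PySem.Int.band state (pvPow a) ≠ 0) != true) = false := by
        simp [hocc2]
      rw [hcond, if_neg Bool.false_ne_true]

-- empty regime: A's fold produces B's filter/map; invariant: sign_from = pvBSign at the loop head
theorem pvA_emp (state pos : Int) (hpos : 0 ≤ pos)
    (_hocc : PySem.Int.band state (pvPow pos) = 0) :
    ∀ (k : Nat) (n a : Int), (n - a).toNat = k → pos < a →
      ∀ (res : List (Int × Int × Int)) (s : Int),
        ((PySem.List.pyRange a n 1).foldl
            (pvAStep pos (PySem.Int.bxor state (pvPow pos)) 0 state)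
            (res, s, pvBSign state pos a)).1
          = res ++ ((PySem.List.pyRange a n 1).filter
              (fun pos2 => decide (PySem.Int.band state (pvPow pos2) ≠ 0) != false)).map
              (fun pos2 => (pos2, PySem.Int.bxor (PySem.Int.bxor state (pvPow pos)) (pvPow pos2),
                pvBSign state pos pos2)) := by
  intro k
  induction k with
  | zero =>
    intro n a hk ha res s
    rw [PySem.List.pyRange_one_eq_nil (by omega)]
    simp
  | succ k ih =>
    intro n a hk ha res s
    have han : a < n := by omega
    rw [PySem.List.pyRange_one_cons han]
    simp only [List.foldl_cons, List.filter_cons]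
    by_cases hocc2 : PySem.Int.band state (pvPow a) = 0
    · have hstep : pvAStep pos (PySem.Int.bxor state (pvPow pos)) 0 state
          (res, s, pvBSign state pos a) a
          = (res, s * (-1), pvBSign state pos (a + 1)) := by
        rw [pvBSign_succ state pos a hpos ha, if_pos hocc2]
        simp [pvAStep, hocc2, show ¬ pos ≥ a by omega]
      rw [hstep, ih n (a + 1) (by omega) (by omega)]
      have hcond : (decide (PySem.Int.band state (pvPow a) ≠ 0) != false) = false := by
        simp [hocc2]
      rw [hcond, if_neg Bool.false_ne_true]
    · have hstep : pvAStep pos (PySem.Int.bxor state (pvPow pos)) 0 state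
          (res, s, pvBSign state pos a) a
          = (res ++ [(a, PySem.Int.bxor (PySem.Int.bxor state (pvPow pos)) (pvPow a), pvBSign state pos a)],
              s * (-1), pvBSign state pos (a + 1)) := by
        rw [pvBSign_succ state pos a hpos ha, if_neg hocc2]
        simp [pvAStep, hocc2, show ¬ pos ≥ a by omega]
      rw [hstep, ih n (a + 1) (by omega) (by omega)]
      have hcond : (decide (PySem.Int.band state (pvPow a) ≠ 0) != false) = true := by
        simp [hocc2]
      rw [hcond, if_pos rfl]
      simp

-- ===== VERDICT (by name: the statement is the Claim_ definition above) =====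
theorem hopping_candidates_py_spec : Claim_equal_hopping_candidates_py := by
  intro num_sites state pos _ hpre
  unfold Spec_hopping_candidates_py hopping_candidates_py hopping_candidates_py_alt
  simp only []
  rw [pvA_range num_sites state pos _ _ hpre]
  by_cases hocc : PySem.Int.band state (pvPow pos) = 0
  · have h := pvA_emp state pos hpre hocc (num_sites - (pos + 1)).toNat num_sites (pos + 1) rfl
      (by omega) [] 1
    rw [pvBSign_base state pos hpre, List.nil_append] at h
    have hoccb : decide (PySem.Int.band state (pvPow pos) ≠ 0) = false := by simp [hocc]
    rw [hoccb, hocc]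
    exact h
  · have h := pvA_occ state pos hpre hocc (num_sites - (pos + 1)).toNat num_sites (pos + 1) rfl
      (by omega) [] 1
    rw [pvBSign_base state pos hpre, List.nil_append] at h
    have hoccb : decide (PySem.Int.band state (pvPow pos) ≠ 0) = true := by simp [hocc]
    rw [hoccb]
    exact h
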